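-- pv_equiv track=rewrite | github.com/HorusXIV/Advent-of-Code | 2022/Day12/Code.py | startingPoint
-- ===== SOURCE A (Python) =====
-- class Node:
--     def __init__(self, row, col, dist):
--         self.row = row
--         self.col = col
--         self.dist = dist
--
--
--     def __repr__(self):
--         return f"Node({self.row}, {self.col}, {self.dist})"
--
-- def getValue(n):
--     if n == 'S':
--         return ord('a')
--     if n == 'E':
--         return ord('z')
--     return ord(n)
--
-- def startingPoint(grid, part):
--
--     sources = []
--
--     erg = []
--     # Find startingpoint
--
--     for row in range(len(grid)):
--         for col in range(len(grid[row])):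
--             start = Node(0, 0, 0)
--             if part == 1:
--                 if grid[row][col] == 'S':
--                     start.row = row
--                     start.col = col
--                     sources.append(start)
--                     break
--             if part ==2:
--                 if grid[row][col] == 'a':
--                     start.row = row
--                     start.col = col
--                     sources.append(start)
--
--     for node in sources:
--         erg.append(minDistance(grid, node))
--
--     shortestPath = 10000000000000000000000
--     for element in erg:
--         if element < shortestPath and element != -1:
--             shortestPath = element
--     return shortestPath
--
-- def minDistance(grid, source):
--     # Create second map to check visited
--     visited = [[False for _ in range(len(grid[0]))]
--                for _ in range(len(grid))]
--
--     queue = []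
--     queue.append(source)
--     visited[source.row][source.col] = True
--
--     while len(queue) != 0:
--         source = queue.pop(0)
--
--         #check if destination
--         if (grid[source.row][source.col] == 'E'):
--             return source.dist
--
--         # Check above
--         if isValid(source.row, source.col, source.row - 1, source.col, grid, visited):
--             queue.append(Node(source.row - 1, source.col, source.dist + 1))
--             visited[source.row - 1][source.col] = True
--
--         # check down
--         if isValid(source.row, source.col, source.row + 1, source.col, grid, visited):
--             queue.append(Node(source.row + 1, source.col, source.dist + 1))
--             visited[source.row + 1][source.col] = True
--
--         # check left
--         if isValid(source.row, source.col, source.row, source.col - 1, grid, visited):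
--             queue.append(Node(source.row, source.col - 1, source.dist + 1))
--             visited[source.row][source.col - 1] = True
--
--
--         # check right
--         if isValid(source.row, source.col, source.row, source.col + 1, grid, visited):
--             queue.append(Node(source.row, source.col + 1, source.dist + 1))
--             visited[source.row][source.col + 1] = True
--
--     #return -1 if destination is not found
--     return -1
--
-- def isValid(cx,cy,x, y, grid, visited):
--     if ((x >= 0 and y >= 0) and
--         (x < len(grid) and y < len(grid[0])) and
--         #cant be smaller, 0 or 1 bigger
--             (getValue(grid[x][y]) - getValue(grid[cx][cy]) <= 1) and (visited[x][y] == False)):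
--         return True
--     return False
-- ===== SOURCE B (Python) =====
-- def getValue(n):
--     if n == 'S':
--         return ord('a')
--     if n == 'E':
--         return ord('z')
--     return ord(n)
--
--
-- def _multiBFS(grid, sources):
--     if not sources:
--         return -1
--     rows, cols = len(grid), len(grid[0])
--     visited = set(sources)
--     frontier = list(sources)
--     k = 0
--     while frontier:
--         if any(grid[x][y] == 'E' for (x, y) in frontier):
--             return k
--         nxt = []
--         for (x, y) in frontier:
--             h = getValue(grid[x][y])
--             for nx, ny in ((x - 1, y), (x + 1, y), (x, y - 1), (x, y + 1)):
--                 if 0 <= nx < rows and 0 <= ny < cols and (nx, ny) not in visited and getValue(grid[nx][ny]) - h <= 1: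
--                     visited.add((nx, ny))
--                     nxt.append((nx, ny))
--         frontier = nxt
--         k += 1
--     return -1
--
--
-- def startingPoint(grid, part):
--     sources = []
--     if part == 1:
--         for r, row in enumerate(grid):
--             c = row.find('S')
--             if c != -1:
--                 sources.append((r, c))
--     elif part == 2:
--         for r, row in enumerate(grid):
--             for c, ch in enumerate(row):
--                 if ch == 'a':
--                     sources.append((r, c))
--     d = _multiBFS(grid, sources)
--     best = 10000000000000000000000
--     if d != -1 and d < best:
--         best = d
--     return best
-- ===== Notes on version B (the rewrite author's own statement) =====
-- stated objective: faster
-- what changed: A runs one full FIFO-queue BFS per start cell and then takes the minimum over the per-source distances; B collects all start cells and runs a SINGLE multi-source level-synchronous BFS seeded with every start cell at once (distance = level counter, visited as a set), which yields the minimum distance in one traversal; Pre_ excludes only ragged (non-rectangular) grids that contain a start cell, on which A indexes every row by len(grid[0]) and raises IndexError whenever its search touches a missing cell (when the search happens not to, A returns and B returns the same value).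
-- outside the precondition, e.g. on startingPoint(['SE', 'x'], 1): A returns 10000000000000000000000, B returns 10000000000000000000000; on startingPoint(['Sb', 'a'], 1): A raises IndexError, B raises IndexError
import Mathlib
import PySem

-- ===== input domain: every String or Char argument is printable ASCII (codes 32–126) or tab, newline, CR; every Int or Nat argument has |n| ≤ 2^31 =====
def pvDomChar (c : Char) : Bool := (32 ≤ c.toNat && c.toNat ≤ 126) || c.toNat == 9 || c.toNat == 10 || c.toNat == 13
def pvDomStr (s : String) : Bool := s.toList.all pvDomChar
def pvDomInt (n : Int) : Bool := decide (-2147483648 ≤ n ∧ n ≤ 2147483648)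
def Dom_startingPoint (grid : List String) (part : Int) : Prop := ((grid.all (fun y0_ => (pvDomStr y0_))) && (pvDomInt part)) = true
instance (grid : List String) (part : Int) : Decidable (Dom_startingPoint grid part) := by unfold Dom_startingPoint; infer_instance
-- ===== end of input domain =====

-- B replaces A's one-BFS-per-start-cell sweep (each a FIFO-queue BFS with O(V) list.pop(0))
-- by a SINGLE multi-source level-synchronous BFS seeded with all start cells at once;
-- same return value on rectangular grids.

-- ===== PORT A =====
-- Shared transliteration helpers: getValue, and grid indexing grid[x][y] / len(grid[0]).
-- cellA uses the total pyGetD form: exact wherever Python indexes in range; Pre_ excludes the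
-- ragged grids on which Python raises IndexError, so the default branch is never the claimed value.
def getValueA (n : Char) : Int :=
  if n = 'S' then 97 else if n = 'E' then 122 else (n.toNat : Int)
def cellA (grid : List String) (x y : Int) : Char :=
  PySem.List.pyGetD (PySem.List.pyGetD grid x "").toList y ' '
def colsA (grid : List String) : Int := ((grid.headD "").toList.length : Int)
def isValidA (grid : List String) (cx cy x y : Int) (visited : PySem.Set (Int × Int)) : Bool :=
  decide (0 ≤ x) && decide (0 ≤ y) && decide (x < (grid.length : Int)) && decide (y < colsA grid)
    && decide (getValueA (cellA grid x y) - getValueA (cellA grid cx cy) ≤ 1)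
    && !(PySem.Set.contains visited (x, y))
def allCellsA (grid : List String) : List (Int × Int) :=
  (PySem.List.pyRange 0 (grid.length : Int) 1).flatMap
    (fun r => (PySem.List.pyRange 0 (colsA grid) 1).map (fun c => (r, c)))
def pushStepA (grid : List String) (r c d : Int)
    (st : List ((Int × Int) × Int) × PySem.Set (Int × Int)) (xy : Int × Int) :
    List ((Int × Int) × Int) × PySem.Set (Int × Int) :=
  if isValidA grid r c xy.1 xy.2 st.2 then (st.1 ++ [(xy, d + 1)], PySem.Set.add st.2 xy) else st

def pushA (grid : List String) (r c d : Int) (q : List ((Int × Int) × Int)) (v : PySem.Set (Int × Int)) :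
    List ((Int × Int) × Int) × PySem.Set (Int × Int) :=
  let st := pushStepA grid r c d (q, v) (r - 1, c)
  let st := pushStepA grid r c d st (r + 1, c)
  let st := pushStepA grid r c d st (r, c - 1)
  let st := pushStepA grid r c d st (r, c + 1)
  st

-- fuel-based totality guard for the while-loop: one unit per dequeue; minDistanceA passes
-- fuel (number of cells + 1), provably enough since every enqueue marks a fresh unvisited cell
def bfsA (grid : List String) : Nat → List ((Int × Int) × Int) → PySem.Set (Int × Int) → Int
  | _, [], _ => -1
  | 0, _ :: _, _ => -1
  | fuel + 1, (rc, d) :: rest, visited =>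
    if cellA grid rc.1 rc.2 = 'E' then d
    else
      let st := pushA grid rc.1 rc.2 d rest visited
      bfsA grid fuel st.1 st.2

def innerLoopA (grid : List String) (part : Int) (row : Int) : List Int → List (Int × Int)
  | [] => []
  | col :: rest =>
    if part = 1 ∧ cellA grid row col = 'S' then [(row, col)]
    else if part = 2 ∧ cellA grid row col = 'a' then (row, col) :: innerLoopA grid part row rest
    else innerLoopA grid part row rest

def sourcesA (grid : List String) (part : Int) : List (Int × Int) :=
  (PySem.List.pyRange 0 (grid.length : Int) 1).foldl
    (fun acc r => acc ++ innerLoopA grid part r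
      (PySem.List.pyRange 0 ((PySem.List.pyGetD grid r "").toList.length : Int) 1)) []

def minDistanceA (grid : List String) (src : Int × Int) : Int :=
  bfsA grid ((allCellsA grid).length + 1) [(src, 0)] (PySem.Set.add PySem.Set.empty src)

def startingPoint (grid : List String) (part : Int) : Int :=
  let sources := sourcesA grid part
  let erg := sources.foldl (fun acc node => acc ++ [minDistanceA grid node]) []
  erg.foldl (fun sp e => if e < sp ∧ e ≠ -1 then e else sp) 10000000000000000000000

-- ===== PORT B =====
def validB (grid : List String) (visited : PySem.Set (Int × Int)) (h : Int) (nx ny : Int) : Bool :=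
  decide (0 ≤ nx) && decide (nx < (grid.length : Int)) && decide (0 ≤ ny) && decide (ny < colsA grid)
    && !(PySem.Set.contains visited (nx, ny))
    && decide (getValueA (cellA grid nx ny) - h ≤ 1)
def pushStepB (grid : List String) (h : Int)
    (st : List (Int × Int) × PySem.Set (Int × Int)) (xy : Int × Int) :
    List (Int × Int) × PySem.Set (Int × Int) :=
  if validB grid st.2 h xy.1 xy.2 then (st.1 ++ [xy], PySem.Set.add st.2 xy) else st

def expandCellB (grid : List String)
    (st : List (Int × Int) × PySem.Set (Int × Int)) (p : Int × Int) :
    List (Int × Int) × PySem.Set (Int × Int) :=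
  [(p.1 - 1, p.2), (p.1 + 1, p.2), (p.1, p.2 - 1), (p.1, p.2 + 1)].foldl
    (pushStepB grid (getValueA (cellA grid p.1 p.2))) st

def expandB (grid : List String) (frontier : List (Int × Int)) (v : PySem.Set (Int × Int)) :
    List (Int × Int) × PySem.Set (Int × Int) :=
  frontier.foldl (expandCellB grid) ([], v)

-- fuel guard for the while-loop: one unit per level; the caller passes cells + |sources| + 1,
-- provably enough since each executed level marks at least one fresh unvisited cell
def bfsB (grid : List String) : Nat → List (Int × Int) → PySem.Set (Int × Int) → Int → Int
  | _, [], _, _ => -1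
  | 0, _ :: _, _, _ => -1
  | fuel + 1, frontier, visited, k =>
    if frontier.any (fun p => cellA grid p.1 p.2 == 'E') then k
    else
      let st := expandB grid frontier visited
      bfsB grid fuel st.1 st.2 (k + 1)

def sourcesB (grid : List String) (part : Int) : List (Int × Int) :=
  if part = 1 then
    (PySem.List.enumerate grid 0).foldl
      (fun acc p =>
        let c := PySem.Str.find p.2 "S"
        if c ≠ -1 then acc ++ [(p.1, c)] else acc) []
  else if part = 2 then
    (PySem.List.enumerate grid 0).foldl
      (fun acc p =>
        (PySem.List.enumerate p.2.toList 0).foldl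
          (fun a2 q => if q.2 = 'a' then a2 ++ [(p.1, q.1)] else a2) acc) []
  else []

def startingPoint_alt (grid : List String) (part : Int) : Int :=
  let sources := sourcesB grid part
  let d := if sources = [] then (-1 : Int)
           else bfsB grid ((allCellsA grid).length + sources.length + 1) sources
                  (PySem.Set.ofList sources) 0
  if d ≠ -1 ∧ d < 10000000000000000000000 then d else 10000000000000000000000

-- ===== PRECONDITION & SPEC =====
-- Pre_ excludes only the non-rectangular (ragged) grids on which the scan finds a start cell
-- ('S' for part 1, 'a' for part 2): there A runs its BFS indexing every row and the visited matrix
-- by len(grid[0]) and raises IndexError whenever the search touches a missing cell; when it happens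
-- not to touch one, A and B return the same value, but the raising cases cannot be mirrored by
-- total ports. Ragged grids with no start cell (and any part other than 1 or 2) are included.
def Pre_startingPoint (grid : List String) (part : Int) : Prop :=
  (∀ row ∈ grid, row.toList.length = (grid.headD "").toList.length)
  ∨ (part = 1 ∧ ∀ row ∈ grid, 'S' ∉ row.toList)
  ∨ (part = 2 ∧ ∀ row ∈ grid, 'a' ∉ row.toList)
  ∨ (part ≠ 1 ∧ part ≠ 2)
instance (grid : List String) (part : Int) : Decidable (Pre_startingPoint grid part) := by
  unfold Pre_startingPoint; infer_instance
def pvWitness_startingPoint : List String × Int := (["aE"], 2)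
def Spec_startingPoint (grid : List String) (part : Int) (out : Int) : Prop := out = startingPoint_alt grid part
instance (grid : List String) (part : Int) (out : Int) : Decidable (Spec_startingPoint grid part out) := by unfold Spec_startingPoint; infer_instance

-- ===== CLAIM (what is proved, stated in full; the proofs are below) =====
def Claim_equal_startingPoint : Prop := ∀ (grid : List String) (part : Int), Dom_startingPoint grid part → Pre_startingPoint grid part → Spec_startingPoint grid part (startingPoint grid part)

-- ===== LEMMAS AND PROOFS =====

def unvA (grid : List String) (v : PySem.Set (Int × Int)) : Nat :=
  ((allCellsA grid).filter (fun p => decide (p ∉ v))).length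

theorem bool_eq_of_iff {a b : Bool} (h : a = true ↔ b = true) : a = b := by
  cases a <;> cases b <;> simp_all

theorem nodup_allCellsA (grid : List String) : (allCellsA grid).Nodup := by
  unfold allCellsA
  have : (fun (r : Int) => (PySem.List.pyRange 0 (colsA grid) 1).map (fun c => (r, c))) = (fun r => (PySem.List.pyRange 0 (colsA grid) 1).map (Prod.mk r)) := rfl
  rw [this]
  exact List.Nodup.product (PySem.List.nodup_pyRange_one _ _) (PySem.List.nodup_pyRange_one _ _)

theorem mem_allCellsA (grid : List String) (p : Int × Int)
    (h1 : 0 ≤ p.1) (h2 : p.1 < (grid.length : Int)) (h3 : 0 ≤ p.2) (h4 : p.2 < colsA grid) :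
    p ∈ allCellsA grid := by
  unfold allCellsA
  simp only [List.mem_flatMap, List.mem_map]
  exact ⟨p.1, by rw [PySem.List.mem_pyRange_one]; exact ⟨h1, h2⟩,
    p.2, by rw [PySem.List.mem_pyRange_one]; exact ⟨h3, h4⟩, rfl⟩

theorem unv_add (grid : List String) (v : PySem.Set (Int × Int)) (p : Int × Int)
    (hp : p ∈ allCellsA grid) (hv : p ∉ v) :
    unvA grid (PySem.Set.add v p) + 1 = unvA grid v := by
  unfold unvA
  rw [PySem.Set.add_of_not_mem hv]
  have hcongr : (allCellsA grid).filter (fun q => decide (q ∉ v ++ [p]))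
      = ((allCellsA grid).filter (fun q => decide (q ∉ v))).filter (fun q => decide (q ≠ p)) := by
    rw [List.filter_filter]
    apply List.filter_congr
    intro q _
    simp [List.mem_append, not_or, and_comm]
  rw [hcongr]
  have hnd : (((allCellsA grid).filter (fun q => decide (q ∉ v)))).Nodup :=
    (nodup_allCellsA grid).filter _
  have hpmem : p ∈ (allCellsA grid).filter (fun q => decide (q ∉ v)) := by
    rw [List.mem_filter]; exact ⟨hp, by simpa using hv⟩
  have hfe : (fun (q : Int × Int) => decide (q ≠ p)) = (fun q => q != p) := by
    funext q; by_cases h : q = p <;> simp [h, bne]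
  rw [hfe]
  have herase := List.Nodup.erase_eq_filter hnd p
  rw [← herase]
  have h1 := List.length_erase_of_mem hpmem
  have h2 := List.length_pos_of_mem hpmem
  omega

-- generic bound for one conditional push
theorem pushIf_bound {α : Type} (grid : List String) (cond : Bool) (q : List α) (v : PySem.Set (Int × Int))
    (p : Int × Int) (a : α)
    (h : cond = true → p ∈ allCellsA grid ∧ p ∉ v) :
    unvA grid (if cond then (q ++ [a], PySem.Set.add v p) else (q, v)).2
      + (if cond then (q ++ [a], PySem.Set.add v p) else (q, v)).1.length
      ≤ unvA grid v + q.length := by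
  cases cond with
  | false => simp
  | true =>
    obtain ⟨hp, hv⟩ := h rfl
    have := unv_add grid v p hp hv
    simp
    omega

theorem pushStepA_bound (grid : List String) (r c d : Int) (st : List ((Int × Int) × Int) × PySem.Set (Int × Int)) (xy : Int × Int) :
    unvA grid (pushStepA grid r c d st xy).2 + (pushStepA grid r c d st xy).1.length
      ≤ unvA grid st.2 + st.1.length := by
  have h : isValidA grid r c xy.1 xy.2 st.2 = true → xy ∈ allCellsA grid ∧ xy ∉ st.2 := by
    intro hv
    unfold isValidA at hv
    simp only [Bool.and_eq_true, decide_eq_true_eq, Bool.not_eq_true'] at hv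
    refine ⟨mem_allCellsA grid xy hv.1.1.1.1.1 hv.1.1.1.2 hv.1.1.1.1.2 hv.1.1.2, ?_⟩
    intro hm
    rw [← PySem.Set.contains_iff] at hm
    rw [hv.2] at hm
    exact Bool.false_ne_true hm
  have := pushIf_bound grid (isValidA grid r c xy.1 xy.2 st.2) st.1 st.2 xy (xy, d+1) h
  unfold pushStepA
  cases hc : isValidA grid r c xy.1 xy.2 st.2 <;> simp_all

theorem pushA_bound (grid : List String) (r c d : Int) (q : List ((Int × Int) × Int)) (v : PySem.Set (Int × Int)) :
    unvA grid (pushA grid r c d q v).2 + (pushA grid r c d q v).1.length ≤ unvA grid v + q.length := by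
  unfold pushA
  calc _ ≤ _ := pushStepA_bound grid r c d _ (r, c + 1)
    _ ≤ _ := pushStepA_bound grid r c d _ (r, c - 1)
    _ ≤ _ := pushStepA_bound grid r c d _ (r + 1, c)
    _ ≤ _ := pushStepA_bound grid r c d (q, v) (r - 1, c)

theorem pushStepB_bound (grid : List String) (h : Int) (st : List (Int × Int) × PySem.Set (Int × Int)) (xy : Int × Int) :
    unvA grid (pushStepB grid h st xy).2 + (pushStepB grid h st xy).1.length
      ≤ unvA grid st.2 + st.1.length := by
  have hv : validB grid st.2 h xy.1 xy.2 = true → xy ∈ allCellsA grid ∧ xy ∉ st.2 := by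
    intro hv
    unfold validB at hv
    simp only [Bool.and_eq_true, decide_eq_true_eq, Bool.not_eq_true'] at hv
    refine ⟨mem_allCellsA grid xy hv.1.1.1.1.1 hv.1.1.1.1.2 hv.1.1.1.2 hv.1.1.2, ?_⟩
    intro hm
    rw [← PySem.Set.contains_iff] at hm
    rw [hv.1.2] at hm
    exact Bool.false_ne_true hm
  have := pushIf_bound grid (validB grid st.2 h xy.1 xy.2) st.1 st.2 xy xy hv
  unfold pushStepB
  cases hc : validB grid st.2 h xy.1 xy.2 <;> simp_all

theorem expandCellB_bound (grid : List String) (st : List (Int × Int) × PySem.Set (Int × Int)) (p : Int × Int) :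
    unvA grid (expandCellB grid st p).2 + (expandCellB grid st p).1.length
      ≤ unvA grid st.2 + st.1.length := by
  unfold expandCellB
  simp only [List.foldl_cons, List.foldl_nil]
  calc _ ≤ _ := pushStepB_bound grid _ _ (p.1, p.2 + 1)
    _ ≤ _ := pushStepB_bound grid _ _ (p.1, p.2 - 1)
    _ ≤ _ := pushStepB_bound grid _ _ (p.1 + 1, p.2)
    _ ≤ _ := pushStepB_bound grid _ st (p.1 - 1, p.2)

theorem foldl_expand_bound (grid : List String) (l : List (Int × Int)) (st : List (Int × Int) × PySem.Set (Int × Int)) :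
    unvA grid (l.foldl (expandCellB grid) st).2 + (l.foldl (expandCellB grid) st).1.length
      ≤ unvA grid st.2 + st.1.length := by
  induction l generalizing st with
  | nil => simp
  | cons p ps ih =>
    simp only [List.foldl_cons]
    exact le_trans (ih (expandCellB grid st p)) (expandCellB_bound grid st p)

theorem valid_eq (grid : List String) (r c x y : Int) (v : PySem.Set (Int × Int)) :
    isValidA grid r c x y v = validB grid v (getValueA (cellA grid r c)) x y := by
  unfold isValidA validB
  cases h1 : decide (0 ≤ x) <;> cases h2 : decide (0 ≤ y) <;>
    cases h3 : decide (x < (grid.length : Int)) <;> cases h4 : decide (y < colsA grid) <;>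
    cases h5 : decide (getValueA (cellA grid x y) - getValueA (cellA grid r c) ≤ 1) <;>
    cases h6 : PySem.Set.contains v (x, y) <;> simp

theorem pushStep_corr (grid : List String) (rc : Int × Int) (k : Int)
    (pre : List ((Int × Int) × Int)) (acc : List (Int × Int)) (v : PySem.Set (Int × Int)) (xy : Int × Int) :
    pushStepA grid rc.1 rc.2 k (pre ++ acc.map (fun p => (p, k + 1)), v) xy
      = (pre ++ (pushStepB grid (getValueA (cellA grid rc.1 rc.2)) (acc, v) xy).1.map (fun p => (p, k + 1)),
         (pushStepB grid (getValueA (cellA grid rc.1 rc.2)) (acc, v) xy).2) := by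
  unfold pushStepA pushStepB
  simp only [valid_eq]
  split <;> simp

theorem pushA_corr (grid : List String) (rc : Int × Int) (k : Int)
    (pre : List ((Int × Int) × Int)) (acc : List (Int × Int)) (v : PySem.Set (Int × Int)) :
    pushA grid rc.1 rc.2 k (pre ++ acc.map (fun p => (p, k + 1))) v
      = (pre ++ (expandCellB grid (acc, v) rc).1.map (fun p => (p, k + 1)),
         (expandCellB grid (acc, v) rc).2) := by
  unfold pushA expandCellB
  simp only [List.foldl_cons, List.foldl_nil, pushStep_corr]

theorem levelA (grid : List String) (k : Int) :
    ∀ (pend acc : List (Int × Int)) (v : PySem.Set (Int × Int)) (f : Nat),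
    unvA grid v + pend.length + acc.length ≤ f →
    bfsA grid f (pend.map (fun p => (p, k)) ++ acc.map (fun p => (p, k + 1))) v =
      (if pend.any (fun p => cellA grid p.1 p.2 == 'E') then k
       else bfsA grid (f - pend.length)
              ((pend.foldl (expandCellB grid) (acc, v)).1.map (fun p => (p, k + 1)))
              (pend.foldl (expandCellB grid) (acc, v)).2) := by
  intro pend
  induction pend with
  | nil => intro acc v f hf; simp
  | cons p ps ih =>
    intro acc v f hf
    obtain ⟨f', rfl⟩ : ∃ f', f = f' + 1 := by
      cases f with
      | zero => simp at hf
      | succ f' => exact ⟨f', rfl⟩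
    simp only [List.map_cons, List.cons_append, List.any_cons, List.foldl_cons]
    rw [bfsA]
    by_cases hE : cellA grid p.1 p.2 = 'E'
    · simp [hE]
    · simp only [hE, if_false]
      rw [pushA_corr grid p k (ps.map (fun q => (q, k))) acc v]
      have hstep := pushA_bound grid p.1 p.2 k
        (ps.map (fun q => (q, k)) ++ acc.map (fun q => (q, k + 1))) v
      have hq : (ps.map (fun q => (q, k)) ++ acc.map (fun q => (q, k + 1))).length
          = ps.length + acc.length := by simp
      rw [ih _ _ f' ?_]
      · have hb : (cellA grid p.1 p.2 == 'E') = false := by simp [hE]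
        rw [hb, Bool.false_or]
        have hlen : (p :: ps).length = ps.length + 1 := by simp
        rw [hlen, show f' + 1 - (ps.length + 1) = f' - ps.length from by omega]
      · -- fuel bound for the tail: one push conserves unvisited + queue length
        have hc := pushA_corr grid p k (ps.map (fun q => (q, k))) acc v
        rw [hc] at hstep
        dsimp only at hstep ⊢
        simp only [List.length_append, List.length_map] at hstep ⊢
        simp only [List.length_cons] at hf
        omega

theorem bfsA_nil (grid : List String) (f : Nat) (v : PySem.Set (Int × Int)) :
    bfsA grid f [] v = -1 := by
  cases f <;> rfl

theorem bfsB_nil (grid : List String) (f : Nat) (v : PySem.Set (Int × Int)) (k : Int) :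
    bfsB grid f [] v k = -1 := by
  cases f <;> rfl

theorem bfsB_cons (grid : List String) (f : Nat) (a : Int × Int) (l : List (Int × Int))
    (V : PySem.Set (Int × Int)) (k : Int) :
    bfsB grid (f + 1) (a :: l) V k
      = if (a :: l).any (fun p => cellA grid p.1 p.2 == 'E') then k
        else bfsB grid f (expandB grid (a :: l) V).1 (expandB grid (a :: l) V).2 (k + 1) := rfl

theorem unv_le_cells (grid : List String) (v : PySem.Set (Int × Int)) :
    unvA grid v ≤ (allCellsA grid).length := List.length_filter_le _ _

-- ---------- semantic characterisation of level-synchronous BFS ----------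

def nbrsL (p : Int × Int) : List (Int × Int) :=
  [(p.1 - 1, p.2), (p.1 + 1, p.2), (p.1, p.2 - 1), (p.1, p.2 + 1)]

def adjB (grid : List String) (p q : Int × Int) : Bool :=
  decide (q ∈ nbrsL p) && decide (0 ≤ q.1) && decide (q.1 < (grid.length : Int))
    && decide (0 ≤ q.2) && decide (q.2 < colsA grid)
    && decide (getValueA (cellA grid q.1 q.2) - getValueA (cellA grid p.1 p.2) ≤ 1)

def ballB (grid : List String) (S : List (Int × Int)) : Nat → (Int × Int) → Bool
  | 0, p => decide (p ∈ S)
  | k + 1, p => ballB grid S k p || (allCellsA grid).any (fun q => ballB grid S k q && adjB grid q p)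

def bPrevB (grid : List String) (S : List (Int × Int)) : Nat → (Int × Int) → Bool
  | 0, _ => false
  | k + 1, p => ballB grid S k p

def hitE (grid : List String) (S : List (Int × Int)) (k : Nat) : Prop :=
  ∃ p, ballB grid S k p = true ∧ cellA grid p.1 p.2 = 'E'

theorem nbrsL_nodup (p : Int × Int) : (nbrsL p).Nodup := by
  simp [nbrsL, Prod.ext_iff]
  omega

theorem adjB_mem_nbrs (grid : List String) (p q : Int × Int) (h : adjB grid p q = true) :
    q ∈ nbrsL p := by
  unfold adjB at h
  simp only [Bool.and_eq_true, decide_eq_true_eq] at h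
  exact h.1.1.1.1.1

theorem valid_adj (grid : List String) (W : PySem.Set (Int × Int)) (p q : Int × Int)
    (hq : q ∈ nbrsL p) :
    validB grid W (getValueA (cellA grid p.1 p.2)) q.1 q.2
      = (adjB grid p q && !(PySem.Set.contains W q)) := by
  unfold validB adjB
  rw [decide_eq_true hq]
  cases h1 : decide (0 ≤ q.1) <;> cases h2 : decide (q.1 < (grid.length : Int)) <;>
    cases h3 : decide (0 ≤ q.2) <;> cases h4 : decide (q.2 < colsA grid) <;>
    cases h5 : decide (getValueA (cellA grid q.1 q.2) - getValueA (cellA grid p.1 p.2) ≤ 1) <;>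
    cases h6 : PySem.Set.contains W (q.1, q.2) <;> simp

theorem pushFold_mem (grid : List String) (p : Int × Int) :
    ∀ (l : List (Int × Int)), l.Nodup → (∀ x ∈ l, x ∈ nbrsL p) →
    ∀ (acc : List (Int × Int)) (W : PySem.Set (Int × Int)) (q : Int × Int),
    (PySem.Set.contains (l.foldl (pushStepB grid (getValueA (cellA grid p.1 p.2))) (acc, W)).2 q = true
        ↔ PySem.Set.contains W q = true ∨ (q ∈ l ∧ adjB grid p q = true))
    ∧ (q ∈ (l.foldl (pushStepB grid (getValueA (cellA grid p.1 p.2))) (acc, W)).1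
        ↔ q ∈ acc ∨ (q ∈ l ∧ adjB grid p q = true ∧ PySem.Set.contains W q = false)) := by
  intro l
  induction l with
  | nil => intro _ _ acc W q; simp
  | cons x xs ih =>
    intro hnd hsub acc W q
    have hxnb : x ∈ nbrsL p := hsub x (by simp)
    have hxs : x ∉ xs := (List.nodup_cons.mp hnd).1
    have hnd' := (List.nodup_cons.mp hnd).2
    have hsub' : ∀ y ∈ xs, y ∈ nbrsL p := fun y hy => hsub y (by simp [hy])
    simp only [List.foldl_cons]
    have hhead : pushStepB grid (getValueA (cellA grid p.1 p.2)) (acc, W) x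
        = if (adjB grid p x && !(PySem.Set.contains W x)) = true then (acc ++ [x], PySem.Set.add W x)
          else (acc, W) := by
      unfold pushStepB
      rw [valid_adj grid W p x hxnb]
    rw [hhead]
    cases hadj : adjB grid p x with
    | false =>
      rw [if_neg (by simp [hadj])]
      obtain ⟨h2, h1⟩ := ih hnd' hsub' acc W q
      constructor
      · rw [h2]
        by_cases hqx : q = x
        · subst hqx; simp [hadj, hxs]
        · simp [hqx]
      · rw [h1]
        by_cases hqx : q = x
        · subst hqx; simp [hadj, hxs]
        · simp [hqx]
    | true =>
      cases hW : PySem.Set.contains W x with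
      | true =>
        rw [if_neg (by simp [hadj, hW])]
        obtain ⟨h2, h1⟩ := ih hnd' hsub' acc W q
        have hWm : x ∈ W := by rw [← PySem.Set.contains_iff]; exact hW
        constructor
        · rw [h2]
          by_cases hqx : q = x
          · subst hqx; simp [hW, hWm, hadj]
          · simp [hqx]
        · rw [h1]
          by_cases hqx : q = x
          · subst hqx; simp [hW, hWm, hxs]
          · simp [hqx]
      | false =>
        rw [if_pos (by simp [hadj, hW])]
        obtain ⟨h2, h1⟩ := ih hnd' hsub' (acc ++ [x]) (PySem.Set.add W x) q
        have hcadd : PySem.Set.contains (PySem.Set.add W x) q = true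
            ↔ (PySem.Set.contains W q = true ∨ q = x) := by
          rw [PySem.Set.contains_iff, PySem.Set.mem_add, PySem.Set.contains_iff]
        constructor
        · rw [h2, hcadd]
          by_cases hqx : q = x
          · subst hqx; simp [hadj]
          · simp [hqx]
        · rw [h1]
          by_cases hqx : q = x
          · subst hqx
            have hWn : q ∉ W := by
              intro hm
              have hc : PySem.Set.contains W q = true := by
                rw [PySem.Set.contains_iff]; exact hm
              rw [hc] at hW
              exact absurd hW (by simp)
            simp [hadj, hW, hxs, hWn]
          · have hfa : PySem.Set.contains (PySem.Set.add W x) q = false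
                ↔ PySem.Set.contains W q = false := by
              constructor
              · intro h
                cases hc : PySem.Set.contains W q with
                | false => rfl
                | true => rw [hcadd.mpr (Or.inl hc)] at h; exact absurd h (by simp)
              · intro h
                cases hc : PySem.Set.contains (PySem.Set.add W x) q with
                | false => rfl
                | true =>
                  rcases hcadd.mp hc with h' | h'
                  · rw [h] at h'; exact absurd h' (by simp)
                  · exact absurd h' hqx
            rw [hfa]
            simp [hqx]

theorem expandCell_mem (grid : List String) (st : List (Int × Int) × PySem.Set (Int × Int))
    (p q : Int × Int) :
    (PySem.Set.contains (expandCellB grid st p).2 q = true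
        ↔ PySem.Set.contains st.2 q = true ∨ adjB grid p q = true)
    ∧ (q ∈ (expandCellB grid st p).1
        ↔ q ∈ st.1 ∨ (adjB grid p q = true ∧ PySem.Set.contains st.2 q = false)) := by
  have h := pushFold_mem grid p (nbrsL p) (nbrsL_nodup p) (fun x hx => hx) st.1 st.2 q
  have hmem : (q ∈ nbrsL p ∧ adjB grid p q = true) ↔ adjB grid p q = true := by
    constructor
    · exact fun h => h.2
    · exact fun h => ⟨adjB_mem_nbrs grid p q h, h⟩
  have he : expandCellB grid st p
      = (nbrsL p).foldl (pushStepB grid (getValueA (cellA grid p.1 p.2))) (st.1, st.2) := by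
    unfold expandCellB nbrsL; rfl
  rw [he]
  constructor
  · rw [h.1, hmem]
  · rw [h.2]
    constructor
    · rintro (h' | ⟨_, h2, h3⟩)
      · exact Or.inl h'
      · exact Or.inr ⟨h2, h3⟩
    · rintro (h' | ⟨h2, h3⟩)
      · exact Or.inl h'
      · exact Or.inr ⟨adjB_mem_nbrs grid p q h2, h2, h3⟩

theorem expandFold_mem (grid : List String) :
    ∀ (F : List (Int × Int)) (acc : List (Int × Int)) (W : PySem.Set (Int × Int)) (q : Int × Int),
    (PySem.Set.contains (F.foldl (expandCellB grid) (acc, W)).2 q = true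
        ↔ PySem.Set.contains W q = true ∨ ∃ p ∈ F, adjB grid p q = true)
    ∧ (q ∈ (F.foldl (expandCellB grid) (acc, W)).1
        ↔ q ∈ acc ∨ (PySem.Set.contains W q = false ∧ ∃ p ∈ F, adjB grid p q = true)) := by
  intro F
  induction F with
  | nil => intro acc W q; simp
  | cons p F' ih =>
    intro acc W q
    simp only [List.foldl_cons]
    have hc := expandCell_mem grid (acc, W) p q
    have hst : expandCellB grid (acc, W) p
        = ((expandCellB grid (acc, W) p).1, (expandCellB grid (acc, W) p).2) := rfl
    rw [hst]
    obtain ⟨ih2, ih1⟩ := ih (expandCellB grid (acc, W) p).1 (expandCellB grid (acc, W) p).2 q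
    have hWfalse : PySem.Set.contains (expandCellB grid (acc, W) p).2 q = false
        ↔ (PySem.Set.contains W q = false ∧ adjB grid p q = false) := by
      constructor
      · intro hcq
        have hnot : ¬ (PySem.Set.contains W q = true ∨ adjB grid p q = true) := by
          intro hor
          have h' := hc.1.mpr hor
          rw [h'] at hcq
          exact absurd hcq (by simp)
        constructor
        · cases hw : PySem.Set.contains W q with
          | false => rfl
          | true => exact absurd (Or.inl hw) hnot
        · cases ha : adjB grid p q with
          | false => rfl
          | true => exact absurd (Or.inr ha) hnot
      · rintro ⟨h1, h2⟩
        cases hcq : PySem.Set.contains (expandCellB grid (acc, W) p).2 q with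
        | false => rfl
        | true =>
          rcases hc.1.mp hcq with h' | h'
          · rw [h1] at h'; exact absurd h' (by simp)
          · rw [h2] at h'; exact absurd h' (by simp)
    constructor
    · rw [ih2, hc.1]
      simp only [List.mem_cons]
      constructor
      · rintro ((h' | h') | ⟨p', hp', ha⟩)
        · exact Or.inl h'
        · exact Or.inr ⟨p, Or.inl rfl, h'⟩
        · exact Or.inr ⟨p', Or.inr hp', ha⟩
      · rintro (h' | ⟨p', (rfl | hp'), ha⟩)
        · exact Or.inl (Or.inl h')
        · exact Or.inl (Or.inr ha)
        · exact Or.inr ⟨p', hp', ha⟩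
    · rw [ih1, hc.2, hWfalse]
      simp only [List.mem_cons]
      constructor
      · rintro ((h' | ⟨ha, hw⟩) | ⟨⟨hw, hna⟩, p', hp', ha⟩)
        · exact Or.inl h'
        · exact Or.inr ⟨hw, p, Or.inl rfl, ha⟩
        · exact Or.inr ⟨hw, p', Or.inr hp', ha⟩
      · rintro (h' | ⟨hw, p', (rfl | hp'), ha⟩)
        · exact Or.inl (Or.inl h')
        · exact Or.inl (Or.inr ⟨ha, hw⟩)
        · cases hpa : adjB grid p q with
          | true => exact Or.inl (Or.inr ⟨rfl, hw⟩)
          | false => exact Or.inr ⟨⟨hw, rfl⟩, p', hp', ha⟩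

theorem ball_mono (grid : List String) (S : List (Int × Int)) (k : Nat) (q : Int × Int)
    (h : ballB grid S k q = true) : ballB grid S (k + 1) q = true := by
  simp [ballB, h]

theorem ball_sub_cells (grid : List String) (S : List (Int × Int))
    (HS : ∀ p ∈ S, p ∈ allCellsA grid) :
    ∀ (k : Nat) (p : Int × Int), ballB grid S k p = true → p ∈ allCellsA grid := by
  intro k
  induction k with
  | zero => intro p h; simp [ballB] at h; exact HS p h
  | succ j ih =>
    intro p h
    simp only [ballB, Bool.or_eq_true, List.any_eq_true, Bool.and_eq_true] at h
    rcases h with h | ⟨q, _, _, hadj⟩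
    · exact ih p h
    · unfold adjB at hadj
      simp only [Bool.and_eq_true, decide_eq_true_eq] at hadj
      exact mem_allCellsA grid p hadj.1.1.1.1.2 hadj.1.1.1.2 hadj.1.1.2 hadj.1.2

theorem ball_succ_frontier (grid : List String) (S F : List (Int × Int)) (k : Nat)
    (HS : ∀ p ∈ S, p ∈ allCellsA grid)
    (hF : ∀ q, q ∈ F ↔ (ballB grid S k q = true ∧ bPrevB grid S k q = false)) :
    ∀ q, ballB grid S (k + 1) q = true
      ↔ (ballB grid S k q = true ∨ ∃ p ∈ F, adjB grid p q = true) := by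
  intro q
  simp only [ballB, Bool.or_eq_true, List.any_eq_true, Bool.and_eq_true]
  constructor
  · rintro (h | ⟨p, _, hball, hadj⟩)
    · exact Or.inl h
    · rcases hbp : bPrevB grid S k p with _ | _
      · exact Or.inr ⟨p, (hF p).mpr ⟨hball, hbp⟩, hadj⟩
      · cases k with
        | zero => simp [bPrevB] at hbp
        | succ j =>
          refine Or.inl ?_
          simp only [ballB, Bool.or_eq_true, List.any_eq_true, Bool.and_eq_true]
          have hpj : ballB grid S j p = true := hbp
          exact Or.inr ⟨p, ball_sub_cells grid S HS j p hpj, hpj, hadj⟩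
  · rintro (h | ⟨p, hp, hadj⟩)
    · exact Or.inl h
    · have hball := ((hF p).mp hp).1
      exact Or.inr ⟨p, ball_sub_cells grid S HS k p hball, hball, hadj⟩

theorem step_inv (grid : List String) (S F : List (Int × Int)) (V : PySem.Set (Int × Int)) (k : Nat)
    (HS : ∀ p ∈ S, p ∈ allCellsA grid)
    (inv1 : ∀ q, PySem.Set.contains V q = ballB grid S k q)
    (inv2 : ∀ q, q ∈ F ↔ (ballB grid S k q = true ∧ bPrevB grid S k q = false)) :
    (∀ q, PySem.Set.contains (expandB grid F V).2 q = ballB grid S (k + 1) q)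
    ∧ (∀ q, q ∈ (expandB grid F V).1
        ↔ (ballB grid S (k + 1) q = true ∧ bPrevB grid S (k + 1) q = false)) := by
  have hsucc := ball_succ_frontier grid S F k HS inv2
  constructor
  · intro q
    apply bool_eq_of_iff
    have h := (expandFold_mem grid F [] V q).1
    unfold expandB
    rw [h, hsucc q, inv1 q]
  · intro q
    have h := (expandFold_mem grid F [] V q).2
    unfold expandB
    rw [h, hsucc q]
    simp only [List.not_mem_nil, false_or, bPrevB]
    constructor
    · rintro ⟨hw, hex⟩
      have hkf : ballB grid S k q = false := by
        have := inv1 q; rw [hw] at this; exact this.symm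
      exact ⟨Or.inr hex, hkf⟩
    · rintro ⟨h', hkf⟩
      have hw : PySem.Set.contains V q = false := by rw [inv1 q, hkf]
      rcases h' with h' | h'
      · rw [h'] at hkf; simp at hkf
      · exact ⟨hw, h'⟩

theorem ball_stab (grid : List String) (S : List (Int × Int)) (j : Nat)
    (h : ballB grid S (j + 1) = ballB grid S j) :
    ∀ t, ballB grid S (j + t) = ballB grid S j := by
  intro t
  induction t with
  | zero => rfl
  | succ t ih =>
    have : j + (t + 1) = (j + t) + 1 := rfl
    rw [this]
    funext p
    show ballB grid S ((j + t) + 1) p = ballB grid S j p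
    simp only [ballB, ih]
    have : (ballB grid S j p || (allCellsA grid).any fun q => ballB grid S j q && adjB grid q p)
        = ballB grid S (j + 1) p := by simp [ballB]
    rw [this, h]

theorem ball_ge_stab (grid : List String) (S : List (Int × Int)) (j m : Nat)
    (h : ballB grid S (j + 1) = ballB grid S j) (hm : j ≤ m) :
    ballB grid S m = ballB grid S j := by
  obtain ⟨t, rfl⟩ := Nat.exists_eq_add_of_le hm
  exact ball_stab grid S j h t

theorem ball_zero_empty (grid : List String) (S : List (Int × Int))
    (h : ∀ q, ballB grid S 0 q = false) : ∀ m q, ballB grid S m q = false := by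
  intro m
  induction m with
  | zero => exact h
  | succ j ih =>
    intro q
    simp only [ballB, Bool.or_eq_false_iff]
    refine ⟨ih q, ?_⟩
    rw [List.any_eq_false]
    intro p _
    rw [ih p]
    simp

theorem empty_frontier_no_hit (grid : List String) (S : List (Int × Int)) (k : Nat)
    (inv2 : ∀ q, q ∈ ([] : List (Int × Int)) ↔ (ballB grid S k q = true ∧ bPrevB grid S k q = false))
    (hlow : ∀ j, j < k → ¬ hitE grid S j) :
    ∀ m, ¬ hitE grid S m := by
  cases k with
  | zero =>
    have h0 : ∀ q, ballB grid S 0 q = false := by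
      intro q
      rcases hq : ballB grid S 0 q with _ | _
      · rfl
      · exact absurd ((inv2 q).mpr ⟨hq, rfl⟩) (List.not_mem_nil)
    intro m ⟨p, hball, _⟩
    rw [ball_zero_empty grid S h0 m p] at hball
    exact Bool.false_ne_true hball
  | succ j =>
    have hstab : ballB grid S (j + 1) = ballB grid S j := by
      funext q
      rcases hq : ballB grid S (j + 1) q with _ | _
      · rcases hq' : ballB grid S j q with _ | _
        · rfl
        · rw [ball_mono grid S j q hq'] at hq; exact absurd hq (by simp)
      · rcases hq' : ballB grid S j q with _ | _
        · exact absurd ((inv2 q).mpr ⟨hq, hq'⟩) (List.not_mem_nil)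
        · rfl
    intro m hm
    rcases Nat.lt_or_ge m j with hmj | hmj
    · exact hlow m (by omega) hm
    · obtain ⟨p, hball, hE⟩ := hm
      rw [ball_ge_stab grid S j m hstab hmj] at hball
      exact hlow j (by omega) ⟨p, hball, hE⟩

theorem bfsB_run (grid : List String) (S : List (Int × Int))
    (HS : ∀ p ∈ S, p ∈ allCellsA grid) :
    ∀ (fuel : Nat) (F : List (Int × Int)) (V : PySem.Set (Int × Int)) (k : Nat),
    unvA grid V + F.length ≤ fuel →
    (∀ q, PySem.Set.contains V q = ballB grid S k q) →
    (∀ q, q ∈ F ↔ (ballB grid S k q = true ∧ bPrevB grid S k q = false)) →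
    (∀ j, j < k → ¬ hitE grid S j) →
    (∃ m, hitE grid S m ∧ (∀ j, j < m → ¬ hitE grid S j)
        ∧ bfsB grid fuel F V (k : Int) = (m : Int))
    ∨ ((∀ m, ¬ hitE grid S m) ∧ bfsB grid fuel F V (k : Int) = -1) := by
  intro fuel
  induction fuel with
  | zero =>
    intro F V k hfuel inv1 inv2 hlow
    cases F with
    | nil => exact Or.inr ⟨empty_frontier_no_hit grid S k inv2 hlow, bfsB_nil grid 0 V (k : Int)⟩
    | cons a l => simp [List.length_cons] at hfuel
  | succ f ih =>
    intro F V k hfuel inv1 inv2 hlow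
    cases F with
    | nil => exact Or.inr ⟨empty_frontier_no_hit grid S k inv2 hlow, bfsB_nil grid (f + 1) V (k : Int)⟩
    | cons a l =>
      by_cases hany : ((a :: l).any fun p => cellA grid p.1 p.2 == 'E') = true
      · refine Or.inl ⟨k, ?_, hlow, ?_⟩
        · rw [List.any_eq_true] at hany
          obtain ⟨p, hp, hE⟩ := hany
          exact ⟨p, ((inv2 p).mp hp).1, by simpa using hE⟩
        · rw [bfsB_cons, if_pos hany]
      · have hk : ¬ hitE grid S k := by
          rintro ⟨p, hball, hE⟩
          rcases hbp : bPrevB grid S k p with _ | _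
          · have hpF : p ∈ a :: l := (inv2 p).mpr ⟨hball, hbp⟩
            rw [List.any_eq_true] at hany
            exact hany ⟨p, hpF, by simpa using hE⟩
          · cases k with
            | zero => simp [bPrevB] at hbp
            | succ j => exact hlow j (by omega) ⟨p, hbp, hE⟩
        obtain ⟨inv1', inv2'⟩ := step_inv grid S (a :: l) V k HS inv1 inv2
        have hbound := foldl_expand_bound grid (a :: l) ([], V)
        simp only [List.length_nil] at hbound
        have hfuel' : unvA grid (expandB grid (a :: l) V).2 + (expandB grid (a :: l) V).1.length ≤ f := by
          have : unvA grid ((a :: l).foldl (expandCellB grid) ([], V)).2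
              + ((a :: l).foldl (expandCellB grid) ([], V)).1.length ≤ unvA grid V := by omega
          simp only [List.length_cons] at hfuel
          unfold expandB
          omega
        have hlow' : ∀ j, j < k + 1 → ¬ hitE grid S j := by
          intro j hj
          rcases Nat.lt_or_ge j k with h' | h'
          · exact hlow j h'
          · have : j = k := by omega
            rw [this]; exact hk
        have hrec := ih (expandB grid (a :: l) V).1 (expandB grid (a :: l) V).2 (k + 1)
          hfuel' inv1' inv2' hlow'
        have hred : bfsB grid (f + 1) (a :: l) V (k : Int)
            = bfsB grid f (expandB grid (a :: l) V).1 (expandB grid (a :: l) V).2 ((k : Int) + 1) := by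
          rw [bfsB_cons, if_neg hany]
        have hcast : ((k + 1 : Nat) : Int) = (k : Int) + 1 := by push_cast; ring
        rcases hrec with ⟨m, hm, hmin, heq⟩ | ⟨hno, heq⟩
        · exact Or.inl ⟨m, hm, hmin, by rw [hred, ← hcast, heq]⟩
        · exact Or.inr ⟨hno, by rw [hred, ← hcast, heq]⟩

-- union / append structure of the ball
theorem ball_append (grid : List String) (S T : List (Int × Int)) :
    ∀ (k : Nat) (p : Int × Int),
    ballB grid (S ++ T) k p = (ballB grid S k p || ballB grid T k p) := by
  intro k
  induction k with
  | zero => intro p; simp [ballB]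
  | succ j ih =>
    intro p
    apply bool_eq_of_iff
    simp only [ballB, Bool.or_eq_true, List.any_eq_true, Bool.and_eq_true, ih]
    constructor
    · rintro (h | ⟨q, hq, h1, h2⟩)
      · rcases h with h | h
        · exact Or.inl (Or.inl h)
        · exact Or.inr (Or.inl h)
      · rcases h1 with h1 | h1
        · exact Or.inl (Or.inr ⟨q, hq, h1, h2⟩)
        · exact Or.inr (Or.inr ⟨q, hq, h1, h2⟩)
    · rintro ((h | ⟨q, hq, h1, h2⟩) | (h | ⟨q, hq, h1, h2⟩))
      · exact Or.inl (Or.inl h)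
      · exact Or.inr ⟨q, hq, Or.inl h1, h2⟩
      · exact Or.inl (Or.inr h)
      · exact Or.inr ⟨q, hq, Or.inr h1, h2⟩

theorem hit_cons (grid : List String) (s : Int × Int) (S : List (Int × Int)) (m : Nat) :
    hitE grid (s :: S) m ↔ (hitE grid [s] m ∨ hitE grid S m) := by
  have hsplit : (s :: S) = [s] ++ S := rfl
  unfold hitE
  constructor
  · rintro ⟨p, hball, hE⟩
    rw [hsplit, ball_append grid [s] S m p, Bool.or_eq_true] at hball
    rcases hball with h | h
    · exact Or.inl ⟨p, h, hE⟩
    · exact Or.inr ⟨p, h, hE⟩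
  · rintro (⟨p, hball, hE⟩ | ⟨p, hball, hE⟩) <;>
      exact ⟨p, by rw [hsplit, ball_append grid [s] S m p, Bool.or_eq_true]; tauto, hE⟩

-- the canonical semantic answer: least level at which an 'E' cell enters the ball, else -1
noncomputable def semHit (grid : List String) (S : List (Int × Int)) : Int :=
  letI : Decidable (∃ m, hitE grid S m) := Classical.dec _
  if ∃ m, hitE grid S m then ((sInf {m : Nat | hitE grid S m} : Nat) : Int) else -1

theorem semHit_of_run (grid : List String) (S : List (Int × Int)) (x : Int)
    (h : (∃ m, hitE grid S m ∧ (∀ j, j < m → ¬ hitE grid S j) ∧ x = (m : Int))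
       ∨ ((∀ m, ¬ hitE grid S m) ∧ x = -1)) :
    x = semHit grid S := by
  unfold semHit
  rcases h with ⟨m, hm, hmin, rfl⟩ | ⟨hno, rfl⟩
  · rw [if_pos (⟨m, hm⟩ : ∃ m, hitE grid S m)]
    congr 1
    have h1 : sInf {m : Nat | hitE grid S m} ≤ m := Nat.sInf_le hm
    have h2 : hitE grid S (sInf {m : Nat | hitE grid S m}) := Nat.sInf_mem (s := {m : Nat | hitE grid S m}) ⟨m, hm⟩
    have h3 : ¬ sInf {m : Nat | hitE grid S m} < m := fun hlt => hmin _ hlt h2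
    omega
  · rw [if_neg (not_exists.mpr hno)]

theorem semHit_ge (grid : List String) (S : List (Int × Int)) :
    semHit grid S = -1 ∨ 0 ≤ semHit grid S := by
  unfold semHit
  by_cases h : ∃ m, hitE grid S m
  · rw [if_pos h]; right; positivity
  · rw [if_neg h]; left; rfl

theorem semHit_nil (grid : List String) : semHit grid [] = -1 := by
  unfold semHit
  rw [if_neg]
  rintro ⟨m, p, hball, _⟩
  rw [ball_zero_empty grid [] (fun q => by simp [ballB]) m p] at hball
  exact Bool.false_ne_true hball

def minNegI (a b : Int) : Int := if a = -1 then b else if b = -1 then a else if a ≤ b then a else b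

theorem semHit_cons (grid : List String) (s : Int × Int) (S : List (Int × Int)) :
    semHit grid (s :: S) = minNegI (semHit grid [s]) (semHit grid S) := by
  unfold semHit minNegI
  by_cases hA : ∃ m, hitE grid [s] m <;> by_cases hB : ∃ m, hitE grid S m
  · have hC : ∃ m, hitE grid (s :: S) m :=
      ⟨hA.choose, (hit_cons grid s S _).mpr (Or.inl hA.choose_spec)⟩
    rw [if_pos hA, if_pos hB, if_pos hC]
    have hfa : hitE grid [s] (sInf {m : Nat | hitE grid [s] m}) := Nat.sInf_mem (s := {m : Nat | hitE grid [s] m}) hA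
    have hfb : hitE grid S (sInf {m : Nat | hitE grid S m}) := Nat.sInf_mem (s := {m : Nat | hitE grid S m}) hB
    have hfc : hitE grid (s :: S) (sInf {m : Nat | hitE grid (s :: S) m}) := Nat.sInf_mem (s := {m : Nat | hitE grid (s :: S) m}) hC
    have h1 : sInf {m : Nat | hitE grid (s :: S) m} ≤ sInf {m : Nat | hitE grid [s] m} :=
      Nat.sInf_le ((hit_cons grid s S _).mpr (Or.inl hfa))
    have h2 : sInf {m : Nat | hitE grid (s :: S) m} ≤ sInf {m : Nat | hitE grid S m} :=
      Nat.sInf_le ((hit_cons grid s S _).mpr (Or.inr hfb))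
    have h3 : sInf {m : Nat | hitE grid [s] m} ≤ sInf {m : Nat | hitE grid (s :: S) m}
        ∨ sInf {m : Nat | hitE grid S m} ≤ sInf {m : Nat | hitE grid (s :: S) m} := by
      rcases (hit_cons grid s S _).mp hfc with h | h
      · exact Or.inl (Nat.sInf_le h)
      · exact Or.inr (Nat.sInf_le h)
    rcases h3 with h3 | h3 <;> split_ifs <;> first | contradiction | omega
  · have hC : ∃ m, hitE grid (s :: S) m :=
      ⟨hA.choose, (hit_cons grid s S _).mpr (Or.inl hA.choose_spec)⟩
    rw [if_pos hA, if_neg hB, if_pos hC]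
    have hfa : hitE grid [s] (sInf {m : Nat | hitE grid [s] m}) := Nat.sInf_mem (s := {m : Nat | hitE grid [s] m}) hA
    have hfc : hitE grid (s :: S) (sInf {m : Nat | hitE grid (s :: S) m}) := Nat.sInf_mem (s := {m : Nat | hitE grid (s :: S) m}) hC
    have h1 : sInf {m : Nat | hitE grid (s :: S) m} ≤ sInf {m : Nat | hitE grid [s] m} :=
      Nat.sInf_le ((hit_cons grid s S _).mpr (Or.inl hfa))
    have h2 : sInf {m : Nat | hitE grid [s] m} ≤ sInf {m : Nat | hitE grid (s :: S) m} := by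
      rcases (hit_cons grid s S _).mp hfc with h | h
      · exact Nat.sInf_le h
      · exact absurd ⟨_, h⟩ hB
    split_ifs <;> first | contradiction | omega
  · have hC : ∃ m, hitE grid (s :: S) m :=
      ⟨hB.choose, (hit_cons grid s S _).mpr (Or.inr hB.choose_spec)⟩
    rw [if_pos hC, if_neg hA, if_pos hB]
    have hfb : hitE grid S (sInf {m : Nat | hitE grid S m}) := Nat.sInf_mem (s := {m : Nat | hitE grid S m}) hB
    have hfc : hitE grid (s :: S) (sInf {m : Nat | hitE grid (s :: S) m}) := Nat.sInf_mem (s := {m : Nat | hitE grid (s :: S) m}) hC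
    have h1 : sInf {m : Nat | hitE grid (s :: S) m} ≤ sInf {m : Nat | hitE grid S m} :=
      Nat.sInf_le ((hit_cons grid s S _).mpr (Or.inr hfb))
    have h2 : sInf {m : Nat | hitE grid S m} ≤ sInf {m : Nat | hitE grid (s :: S) m} := by
      rcases (hit_cons grid s S _).mp hfc with h | h
      · exact absurd ⟨_, h⟩ hA
      · exact Nat.sInf_le h
    omega
  · have hC : ¬ ∃ m, hitE grid (s :: S) m := by
      rintro ⟨m, hm⟩
      rcases (hit_cons grid s S m).mp hm with h | h
      · exact hA ⟨m, h⟩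
      · exact hB ⟨m, h⟩
    rw [if_neg hA, if_neg hB, if_neg hC]
    simp

-- ---------- the queue BFS of A computes the same as the level BFS ----------

theorem bfsAB_aux (grid : List String) :
    ∀ (n : Nat) (F : List (Int × Int)) (v : PySem.Set (Int × Int)) (k : Int) (fA fB : Nat),
    unvA grid v + F.length ≤ n → unvA grid v + F.length ≤ fA → unvA grid v + F.length ≤ fB →
    bfsA grid fA (F.map (fun p => (p, k))) v = bfsB grid fB F v k := by
  intro n
  induction n with
  | zero =>
    intro F v k fA fB h _ _
    have : F = [] := by
      cases F with
      | nil => rfl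
      | cons a l => simp at h
    subst this
    simp only [List.map_nil]
    rw [bfsA_nil, bfsB_nil]
  | succ n ih =>
    intro F v k fA fB h hA hB
    cases hF : F with
    | nil =>
      simp only [List.map_nil]
      rw [bfsA_nil, bfsB_nil]
    | cons a l =>
      rw [← hF]
      have hne : F ≠ [] := by rw [hF]; exact List.cons_ne_nil a l
      have hlen : 0 < F.length := List.length_pos_of_ne_nil hne
      obtain ⟨fB', rfl⟩ : ∃ f', fB = f' + 1 := by
        cases fB with
        | zero => omega
        | succ f' => exact ⟨f', rfl⟩
      have hlev := levelA grid k F [] v fA (by simpa using hA)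
      simp only [List.map_nil, List.append_nil] at hlev
      rw [hlev]
      rw [hF, bfsB_cons, ← hF]
      by_cases hany : (F.any fun p => cellA grid p.1 p.2 == 'E') = true
      · rw [if_pos hany, if_pos hany]
      · rw [if_neg hany, if_neg hany]
        simp only [expandB]
        have hbound := foldl_expand_bound grid F ([], v)
        simp only [List.length_nil] at hbound
        exact ih _ _ (k + 1) _ _ (by omega) (by omega) (by omega)

theorem minDistance_sem (grid : List String) (s : Int × Int) (hs : s ∈ allCellsA grid) :
    minDistanceA grid s = semHit grid [s] := by
  have hle := unv_le_cells grid (PySem.Set.add PySem.Set.empty s)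
  have h1 : minDistanceA grid s
      = bfsB grid ((allCellsA grid).length + 1) [s] (PySem.Set.add PySem.Set.empty s) 0 := by
    unfold minDistanceA
    have h := bfsAB_aux grid (unvA grid (PySem.Set.add PySem.Set.empty s) + 1) [s]
      (PySem.Set.add PySem.Set.empty s) 0 ((allCellsA grid).length + 1) ((allCellsA grid).length + 1)
      (by simp)
      (by have := unv_le_cells grid (PySem.Set.add PySem.Set.empty s)
          simp only [List.length_cons, List.length_nil]; omega)
      (by have := unv_le_cells grid (PySem.Set.add PySem.Set.empty s)
          simp only [List.length_cons, List.length_nil]; omega)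
    simpa using h
  rw [h1]
  apply semHit_of_run
  have hrun := bfsB_run grid [s] (by intro p hp; simp at hp; rwa [hp])
    ((allCellsA grid).length + 1) [s] (PySem.Set.add PySem.Set.empty s) 0
    (by have := unv_le_cells grid (PySem.Set.add PySem.Set.empty s)
        simp only [List.length_cons, List.length_nil]; omega)
    (by
      intro q
      apply bool_eq_of_iff
      rw [PySem.Set.contains_iff, PySem.Set.mem_add]
      simp [ballB, PySem.Set.empty])
    (by intro q; simp [ballB, bPrevB])
    (by intro j hj; omega)
  simpa using hrun

theorem multi_sem (grid : List String) (S : List (Int × Int))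
    (HS : ∀ p ∈ S, p ∈ allCellsA grid) :
    bfsB grid ((allCellsA grid).length + S.length + 1) S (PySem.Set.ofList S) 0 = semHit grid S := by
  have hle := unv_le_cells grid (PySem.Set.ofList S)
  apply semHit_of_run
  have hrun := bfsB_run grid S HS ((allCellsA grid).length + S.length + 1) S (PySem.Set.ofList S) 0
    (by omega)
    (by
      intro q
      apply bool_eq_of_iff
      rw [PySem.Set.contains_iff, PySem.Set.mem_ofList]
      simp [ballB])
    (by intro q; simp [ballB, bPrevB])
    (by intro j hj; omega)
  simpa using hrun

-- ---------- A's per-source minimum equals the semantic answer of the union ----------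

theorem foldA_sem (grid : List String) :
    ∀ (S : List (Int × Int)), (∀ p ∈ S, p ∈ allCellsA grid) → ∀ (acc : Int),
    (S.map (fun s => minDistanceA grid s)).foldl (fun sp e => if e < sp ∧ e ≠ -1 then e else sp) acc
      = if semHit grid S ≠ -1 ∧ semHit grid S < acc then semHit grid S else acc := by
  intro S
  induction S with
  | nil => intro _ acc; simp [semHit_nil]
  | cons s S' ih =>
    intro hS acc
    have hs : s ∈ allCellsA grid := hS s (by simp)
    have hS' : ∀ p ∈ S', p ∈ allCellsA grid := fun p hp => hS p (by simp [hp])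
    simp only [List.map_cons, List.foldl_cons]
    rw [minDistance_sem grid s hs, ih hS', semHit_cons grid s S']
    have ha := semHit_ge grid [s]
    have hb := semHit_ge grid S'
    unfold minNegI
    split_ifs <;> omega

-- ---------- A's source scan equals B's source scan ----------

theorem singleton_prefix_iff {α : Type} (a : α) (t : List α) : [a] <+: t ↔ t.head? = some a := by
  cases t with
  | nil => simp
  | cons b bs => simp [List.cons_prefix_cons, eq_comm]

theorem innerLoopA_one_none (grid : List String) (r : Int) (cols : List Int)
    (h : ∀ c ∈ cols, cellA grid r c ≠ 'S') :
    innerLoopA grid 1 r cols = [] := by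
  induction cols with
  | nil => rfl
  | cons c cs ih =>
    unfold innerLoopA
    have := h c (by simp)
    simp only [this, and_false, if_false]
    have h2 : ¬((1 : Int) = 2 ∧ cellA grid r c = 'a') := by simp
    rw [if_neg h2]
    exact ih (fun c hc => h c (by simp [hc]))

theorem innerLoopA_one_found (grid : List String) (r : Int) :
    ∀ (pre : List Int) (i : Int) (suf : List Int),
    (∀ c ∈ pre, cellA grid r c ≠ 'S') → cellA grid r i = 'S' →
    innerLoopA grid 1 r (pre ++ i :: suf) = [(r, i)] := by
  intro pre
  induction pre with
  | nil =>
    intro i suf _ hi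
    unfold innerLoopA
    simp [hi]
  | cons c cs ih =>
    intro i suf hpre hi
    have hc := hpre c (by simp)
    simp only [List.cons_append]
    unfold innerLoopA
    simp only [hc, and_false, if_false]
    have h2 : ¬((1 : Int) = 2 ∧ cellA grid r c = 'a') := by simp
    rw [if_neg h2]
    exact ih i suf (fun c hc => hpre c (by simp [hc])) hi

theorem innerLoopA_two (grid : List String) (r : Int) (cols : List Int) :
    innerLoopA grid 2 r cols
      = (cols.filter (fun c => cellA grid r c == 'a')).map (fun c => (r, c)) := by
  induction cols with
  | nil => rfl
  | cons c cs ih =>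
    unfold innerLoopA
    have h1 : ¬((2 : Int) = 1 ∧ cellA grid r c = 'S') := by simp
    rw [if_neg h1]
    by_cases h : cellA grid r c = 'a'
    · simp [h, ih]
    · simp [h, ih]

theorem innerLoopA_other (grid : List String) (part r : Int) (h1 : part ≠ 1) (h2 : part ≠ 2)
    (cols : List Int) : innerLoopA grid part r cols = [] := by
  induction cols with
  | nil => rfl
  | cons c cs ih =>
    unfold innerLoopA
    simp [h1, h2, ih]

-- row-level part 1: the inner loop finds exactly the first 'S', as row.find('S') does
theorem rowA_one (grid : List String) (r : Int) :
    innerLoopA grid 1 r (PySem.List.pyRange 0 ((PySem.List.pyGetD grid r "").toList.length : Int) 1)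
      = (let c := PySem.Str.find (PySem.List.pyGetD grid r "") "S"
         if c ≠ -1 then [(r, c)] else []) := by
  have hfind : PySem.Str.find (PySem.List.pyGetD grid r "") "S"
      = PySem.Chars.find (PySem.List.pyGetD grid r "").toList ['S'] := by
    simp
  set cs := (PySem.List.pyGetD grid r "").toList with hcs
  have hcell : ∀ c : Int, cellA grid r c = PySem.List.pyGetD cs c ' ' := fun c => rfl
  simp only [hfind]
  by_cases hneg : PySem.Chars.find cs ['S'] = -1
  · have hnot : ¬ (['S'] <:+: cs) := (PySem.Chars.find_eq_neg_one_iff cs ['S']).mp hneg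
    rw [innerLoopA_one_none]
    · simp [hneg]
    · intro c hc hS
      rw [PySem.List.mem_pyRange_one] at hc
      apply hnot
      have hlt : c.toNat < cs.length := by omega
      have hg : cs[c.toNat] = 'S' := by
        rw [hcell] at hS
        rwa [PySem.List.pyGetD_eq_getElem cs ' ' hc.1 (by omega)] at hS
      obtain ⟨pre, suf, hps⟩ := List.append_of_mem (hg ▸ cs.getElem_mem hlt)
      exact ⟨pre, suf, by simp [hps]⟩
  · have hpos : 0 ≤ PySem.Chars.find cs ['S'] := by
      have := PySem.Chars.neg_one_le_find cs ['S']
      omega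
    obtain ⟨hpref, hmin⟩ := PySem.Chars.find_spec (s := cs) (sub := ['S']) hpos
    set i := PySem.Chars.find cs ['S'] with hi
    have hlen : i.toNat < cs.length := by
      have h3 := hpref.length_le
      rw [List.length_drop] at h3
      simp at h3
      omega
    have hcelli : cellA grid r i = 'S' := by
      rw [hcell]
      rw [PySem.List.pyGetD_eq_getElem cs ' ' hpos (by omega)]
      have h4 := (singleton_prefix_iff 'S' (cs.drop i.toNat)).mp hpref
      rw [List.head?_drop] at h4
      rw [List.getElem?_eq_getElem hlen] at h4
      exact Option.some_injective _ h4
    have hsplit : PySem.List.pyRange 0 (cs.length : Int) 1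
        = PySem.List.pyRange 0 i 1 ++ i :: PySem.List.pyRange (i + 1) (cs.length : Int) 1 := by
      rw [PySem.List.pyRange_one_append 0 i (cs.length : Int) hpos (by omega)]
      rw [PySem.List.pyRange_one_cons (a := i) (b := (cs.length : Int)) (by omega)]
    rw [hsplit]
    rw [innerLoopA_one_found grid r _ i _ ?_ hcelli]
    · have h5 : i ≠ -1 := by omega
      simp [h5]
    · intro c hc hS
      rw [PySem.List.mem_pyRange_one] at hc
      apply hmin c.toNat (by omega)
      rw [singleton_prefix_iff, List.head?_drop]
      have hlt : c.toNat < cs.length := by omega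
      rw [List.getElem?_eq_getElem hlt]
      rw [hcell] at hS
      rw [PySem.List.pyGetD_eq_getElem cs ' ' hc.1 (by omega)] at hS
      rw [hS]

theorem sources_one (grid : List String) : sourcesA grid 1 = sourcesB grid 1 := by
  unfold sourcesA sourcesB
  rw [if_pos rfl]
  rw [PySem.List.enumerate_eq_map_pyRange grid "", List.foldl_map]
  simp only [PySem.List.len_eq]
  have h : ∀ (acc : List (Int × Int)) (r : Int),
      acc ++ innerLoopA grid 1 r (PySem.List.pyRange 0 ((PySem.List.pyGetD grid r "").toList.length : Int) 1)
        = (let c := PySem.Str.find (PySem.List.pyGetD grid r "") "S"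
           if c ≠ -1 then acc ++ [(r, c)] else acc) := by
    intro acc r
    rw [rowA_one]
    by_cases hc : PySem.Chars.find (PySem.List.pyGetD grid r "").toList ['S'] = -1 <;> simp [hc]
  exact PySem.List.foldl_congr_mem _ _ _ _ (fun acc x _ => h acc x)

theorem sources_two (grid : List String) : sourcesA grid 2 = sourcesB grid 2 := by
  unfold sourcesA sourcesB
  rw [if_neg (by norm_num), if_pos rfl]
  rw [PySem.List.enumerate_eq_map_pyRange grid "", List.foldl_map]
  simp only [PySem.List.len_eq]
  have h : ∀ (acc : List (Int × Int)) (r : Int),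
      acc ++ innerLoopA grid 2 r (PySem.List.pyRange 0 ((PySem.List.pyGetD grid r "").toList.length : Int) 1)
        = (PySem.List.enumerate (PySem.List.pyGetD grid r "").toList 0).foldl
            (fun a2 q => if q.2 = 'a' then a2 ++ [(r, q.1)] else a2) acc := by
    intro acc r
    rw [innerLoopA_two]
    rw [PySem.List.foldl_append_ite (fun (q : Int × Char) => q.2 = 'a') (fun (q : Int × Char) => ((r, q.1) : Int × Int))]
    congr 1
    rw [PySem.List.enumerate_eq_map_pyRange (PySem.List.pyGetD grid r "").toList ' ',
      List.filter_map, List.map_map]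
    simp only [PySem.List.len_eq]
    congr 1
  exact PySem.List.foldl_congr_mem _ _ _ _ (fun acc x _ => h acc x)

theorem sources_eq (grid : List String) (part : Int) : sourcesA grid part = sourcesB grid part := by
  by_cases h1 : part = 1
  · subst h1; exact sources_one grid
  by_cases h2 : part = 2
  · subst h2; exact sources_two grid
  · unfold sourcesA sourcesB
    rw [if_neg h1, if_neg h2]
    have h : ∀ (acc : List (Int × Int)) (r : Int),
        acc ++ innerLoopA grid part r (PySem.List.pyRange 0 ((PySem.List.pyGetD grid r "").toList.length : Int) 1) = acc := by
      intro acc r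
      rw [innerLoopA_other grid part r h1 h2]
      simp
    rw [PySem.List.foldl_congr_mem _ _ (fun acc _ => acc) _ (fun acc x _ => h acc x)]
    exact PySem.List.foldl_ignore _ _

-- ---------- the sources lie inside the grid (rectangularity) ----------

theorem mem_foldl_ite_append {α β : Type} (P : β → Prop) [DecidablePred P] (g : β → α) :
    ∀ (l : List β) (acc : List α) (q : α),
    q ∈ l.foldl (fun a x => if P x then a ++ [g x] else a) acc →
    q ∈ acc ∨ ∃ x ∈ l, P x ∧ q = g x := by
  intro l
  induction l with
  | nil => intro acc q h; exact Or.inl h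
  | cons x xs ih =>
    intro acc q h
    simp only [List.foldl_cons] at h
    by_cases hp : P x
    · rw [if_pos hp] at h
      rcases ih _ _ h with h' | ⟨y, hy, hpy, rfl⟩
      · rcases List.mem_append.mp h' with h'' | h''
        · exact Or.inl h''
        · exact Or.inr ⟨x, by simp, hp, (List.mem_singleton.mp h'').symm ▸ rfl⟩
      · exact Or.inr ⟨y, by simp [hy], hpy, rfl⟩
    · rw [if_neg hp] at h
      rcases ih _ _ h with h' | ⟨y, hy, hpy, rfl⟩
      · exact Or.inl h'
      · exact Or.inr ⟨y, by simp [hy], hpy, rfl⟩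

theorem mem_enumerate_bounds (l : List String) (x : Int × String)
    (hx : x ∈ PySem.List.enumerate l 0) :
    0 ≤ x.1 ∧ x.1 < (l.length : Int) ∧ x.2 = PySem.List.pyGetD l x.1 "" := by
  rw [PySem.List.enumerate_eq_map_pyRange l ""] at hx
  simp only [List.mem_map] at hx
  obtain ⟨j, hj, rfl⟩ := hx
  rw [PySem.List.mem_pyRange_one] at hj
  simp only [PySem.List.len_eq] at hj
  exact ⟨hj.1, hj.2, rfl⟩

theorem mem_enumerate_chars_bounds (l : List Char) (x : Int × Char)
    (hx : x ∈ PySem.List.enumerate l 0) :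
    0 ≤ x.1 ∧ x.1 < (l.length : Int) ∧ x.2 = PySem.List.pyGetD l x.1 ' ' := by
  rw [PySem.List.enumerate_eq_map_pyRange l ' '] at hx
  simp only [List.mem_map] at hx
  obtain ⟨j, hj, rfl⟩ := hx
  rw [PySem.List.mem_pyRange_one] at hj
  simp only [PySem.List.len_eq] at hj
  exact ⟨hj.1, hj.2, rfl⟩

theorem row_len_colsA (grid : List String) (j : Int)
    (hPre : ∀ row ∈ grid, row.toList.length = (grid.headD "").toList.length)
    (h1 : 0 ≤ j) (h2 : j < (grid.length : Int)) :
    ((PySem.List.pyGetD grid j "").toList.length : Int) = colsA grid := by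
  have hrow : PySem.List.pyGetD grid j "" = grid[j.toNat] := by
    exact PySem.List.pyGetD_eq_getElem grid "" h1 (by omega)
  have hmem : PySem.List.pyGetD grid j "" ∈ grid := by
    rw [hrow]; exact grid.getElem_mem (by omega)
  have := hPre _ hmem
  unfold colsA
  rw [this]

theorem sourcesB_sub (grid : List String) (part : Int) (hPre : Pre_startingPoint grid part) :
    ∀ p ∈ sourcesB grid part, p ∈ allCellsA grid := by
  intro p hp
  by_cases h1 : part = 1
  · subst h1
    unfold sourcesB at hp
    rw [if_pos rfl] at hp
    have hp' : p ∈ ((PySem.List.enumerate grid 0).foldl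
        (fun a (x : Int × String) => if PySem.Str.find x.2 "S" ≠ -1 then a ++ [((x.1, PySem.Str.find x.2 "S") : Int × Int)] else a) []) := hp
    rcases mem_foldl_ite_append (fun (x : Int × String) => PySem.Str.find x.2 "S" ≠ -1)
      (fun (x : Int × String) => ((x.1, PySem.Str.find x.2 "S") : Int × Int))
      (PySem.List.enumerate grid 0) [] p hp' with h | ⟨x, hx, hfind, rfl⟩
    · simp at h
    · obtain ⟨hj1, hj2, hrow⟩ := mem_enumerate_bounds grid x hx
      have hfc : PySem.Str.find x.2 "S" = PySem.Chars.find x.2.toList ['S'] := by simp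
      have hge : 0 ≤ PySem.Chars.find x.2.toList ['S'] := by
        have := PySem.Chars.neg_one_le_find x.2.toList ['S']
        rw [hfc] at hfind
        omega
      obtain ⟨hpref, -⟩ := PySem.Chars.find_spec (s := x.2.toList) (sub := ['S']) hge
      have hlt : (PySem.Chars.find x.2.toList ['S']).toNat < x.2.toList.length := by
        have h3 := hpref.length_le
        rw [List.length_drop] at h3
        simp only [List.length_singleton] at h3
        omega
      have hrowg : x.2 ∈ grid := by
        rw [hrow, PySem.List.pyGetD_eq_getElem grid "" hj1 (by omega)]
        exact grid.getElem_mem (by omega)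
      have hSmem : 'S' ∈ x.2.toList := by
        obtain ⟨t, ht⟩ := hpref
        exact List.drop_subset _ _ (ht ▸ List.mem_append_left t (by simp))
      rcases hPre with hrect | ⟨-, hno⟩ | ⟨hp2, -⟩ | ⟨hn1, -⟩
      · refine mem_allCellsA grid _ hj1 hj2 (by simpa [hfc] using hge) ?_
        have hcols := row_len_colsA grid x.1 hrect hj1 hj2
        rw [← hrow] at hcols
        simp only [hfc]
        omega
      · exact absurd hSmem (hno x.2 hrowg)
      · exact absurd hp2 (by norm_num)
      · exact absurd rfl hn1
  by_cases h2 : part = 2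
  · subst h2
    unfold sourcesB at hp
    rw [if_neg (by norm_num), if_pos rfl] at hp
    -- rewrite the nested fold into a flatMap
    rw [PySem.List.foldl_congr_mem _ _
      (fun (acc : List (Int × Int)) (x : Int × String) =>
        acc ++ ((PySem.List.enumerate x.2.toList 0).filter
          (fun (q : Int × Char) => decide (q.2 = 'a'))).map (fun q => ((x.1, q.1) : Int × Int)))
      _ (by
        intro acc x _
        rw [PySem.List.foldl_append_ite (fun (q : Int × Char) => q.2 = 'a')
          (fun (q : Int × Char) => ((x.1, q.1) : Int × Int))])] at hp
    rw [PySem.List.foldl_append_eq_flatMap] at hp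
    simp only [List.nil_append, List.mem_flatMap, List.mem_map, List.mem_filter,
      decide_eq_true_eq] at hp
    obtain ⟨x, hx, q, ⟨hq, hqa⟩, rfl⟩ := hp
    obtain ⟨hj1, hj2, hrow⟩ := mem_enumerate_bounds grid x hx
    obtain ⟨hc1, hc2, hcq⟩ := mem_enumerate_chars_bounds x.2.toList q hq
    have hrowg : x.2 ∈ grid := by
      rw [hrow, PySem.List.pyGetD_eq_getElem grid "" hj1 (by omega)]
      exact grid.getElem_mem (by omega)
    have hamem : 'a' ∈ x.2.toList := by
      rw [← hqa, hcq, PySem.List.pyGetD_eq_getElem x.2.toList ' ' hc1 (by omega)]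
      exact x.2.toList.getElem_mem (by omega)
    rcases hPre with hrect | ⟨hp1, -⟩ | ⟨-, hno⟩ | ⟨-, hn2⟩
    · refine mem_allCellsA grid _ hj1 hj2 hc1 ?_
      have hcols := row_len_colsA grid x.1 hrect hj1 hj2
      rw [← hrow] at hcols
      omega
    · exact absurd hp1 (by norm_num)
    · exact absurd hamem (hno x.2 hrowg)
    · exact absurd rfl hn2
  · unfold sourcesB at hp
    rw [if_neg h1, if_neg h2] at hp
    simp at hp

-- ---------- assembly ----------

theorem startingPoint_eq (grid : List String) (part : Int)
    (hPre : Pre_startingPoint grid part) :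
    startingPoint grid part = startingPoint_alt grid part := by
  have hsub := sourcesB_sub grid part hPre
  simp only [startingPoint, startingPoint_alt]
  rw [sources_eq]
  rw [PySem.List.foldl_append_singleton_eq_map]
  simp only [List.nil_append]
  rw [foldA_sem grid (sourcesB grid part) hsub 10000000000000000000000]
  by_cases hS : sourcesB grid part = []
  · rw [hS]
    simp [semHit_nil]
  · rw [if_neg hS, multi_sem grid (sourcesB grid part) hsub]

-- ===== VERDICT (by name: the statement is the Claim_ definition above) =====
theorem startingPoint_spec : Claim_equal_startingPoint := by
  intro grid part _ hPre
  unfold Spec_startingPoint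
  exact startingPoint_eq grid part hPre
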